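-- pv_equiv track=rewrite | github.com/Vaunorage/ClearBias | test5.py | rank_from_tuple
-- ===== SOURCE A (Python) =====
-- def rank_from_tuple(sets, tuple_value):
--     if len(sets) != len(tuple_value):
--         raise ValueError("The tuple must have the same number of elements as there are sets.")
--
--     rank = 0
--     product = 1
--
--     for i in reversed(range(len(sets))):
--         element = tuple_value[i]
--         set_size = len(sets[i])
--         index = sets[i].index(element)
--         rank += index * product
--         product *= set_size
--
--     return rank
-- ===== SOURCE B (Python) =====
-- def _rank(pairs, acc):
--     if not pairs:
--         return acc
--     s, v = pairs[0]
--     return _rank(pairs[1:], acc * len(s) + s.index(v))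
--
--
-- def rank_from_tuple(sets, tuple_value):
--     if len(sets) != len(tuple_value):
--         raise ValueError("The tuple must have the same number of elements as there are sets.")
--     return _rank(list(zip(sets, tuple_value)), 0)
-- ===== Notes on version B (the rewrite author's own statement) =====
-- stated objective: alternative
-- what changed: Replaces the reversed index loop with (rank, product) accumulators by a structural tail recursion over the zipped (set, value) pairs using a single Horner multiply-add accumulator.
import Mathlib
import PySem

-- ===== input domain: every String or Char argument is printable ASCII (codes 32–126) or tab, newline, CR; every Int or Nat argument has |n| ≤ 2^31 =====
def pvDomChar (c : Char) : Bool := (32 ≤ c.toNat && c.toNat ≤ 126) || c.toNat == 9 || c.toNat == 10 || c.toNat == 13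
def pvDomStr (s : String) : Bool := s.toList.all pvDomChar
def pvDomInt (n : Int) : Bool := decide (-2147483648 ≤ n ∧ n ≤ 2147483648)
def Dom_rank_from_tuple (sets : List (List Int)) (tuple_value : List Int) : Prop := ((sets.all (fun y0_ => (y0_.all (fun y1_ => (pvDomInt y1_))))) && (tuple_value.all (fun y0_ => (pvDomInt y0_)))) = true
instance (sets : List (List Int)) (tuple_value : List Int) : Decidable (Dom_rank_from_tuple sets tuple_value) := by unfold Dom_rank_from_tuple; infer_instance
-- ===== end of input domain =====

-- B replaces A's reversed index loop with (rank, product) accumulators by a structural tail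
-- recursion over the zipped (set, value) pairs with a single Horner accumulator (objective: alternative).
-- Python A raises ValueError on a length mismatch and from .index on a missing element; Pre_ excludes exactly those.

-- ===== PORT A =====
-- reversed(range(len(sets))) loop with (rank, product) state; .index via PySem.List.index?
-- (the .getD 0 default on index? is only reached outside Pre_, where Python raises ValueError)
def rank_from_tuple (sets : List (List Int)) (tuple_value : List Int) : Int :=
  (((List.range sets.length).reverse).foldl
    (fun (st : Int × Int) (i : Nat) =>
      (st.1 + ((PySem.List.index? (sets.getD i []) (tuple_value.getD i 0)).getD 0 : Int) * st.2,
       st.2 * ((sets.getD i []).length : Int)))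
    (0, 1)).1

-- ===== PORT B =====
-- _rank(pairs, acc): structural recursion on the pair list, acc = acc * len(s) + s.index(v)
def rankGo : List (List Int × Int) → Int → Int
  | [], acc => acc
  | (s, v) :: rest, acc =>
      rankGo rest (acc * (s.length : Int) + ((PySem.List.index? s v).getD 0 : Int))

-- rank_from_tuple(sets, tuple_value) = _rank(list(zip(sets, tuple_value)), 0)
def rank_from_tuple_alt (sets : List (List Int)) (tuple_value : List Int) : Int :=
  rankGo (sets.zip tuple_value) 0

-- ===== PRECONDITION & SPEC =====
-- Pre_ excludes exactly the inputs where Python A raises: a length mismatch (explicit ValueError)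
-- or some tuple element missing from its set (.index raises ValueError).
def Pre_rank_from_tuple (sets : List (List Int)) (tuple_value : List Int) : Prop :=
  sets.length = tuple_value.length ∧ ∀ i < sets.length, tuple_value.getD i 0 ∈ sets.getD i []
instance (sets : List (List Int)) (tuple_value : List Int) : Decidable (Pre_rank_from_tuple sets tuple_value) := by unfold Pre_rank_from_tuple; infer_instance

def pvWitness_rank_from_tuple : List (List Int) × List Int := ([[1, 2], [3]], [2, 3])

def Spec_rank_from_tuple (sets : List (List Int)) (tuple_value : List Int) (out : Int) : Prop := out = rank_from_tuple_alt sets tuple_value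
instance (sets : List (List Int)) (tuple_value : List Int) (out : Int) : Decidable (Spec_rank_from_tuple sets tuple_value out) := by unfold Spec_rank_from_tuple; infer_instance

-- ===== CLAIM (what is proved, stated in full; the proofs are below) =====
def Claim_equal_rank_from_tuple : Prop := ∀ (sets : List (List Int)) (tuple_value : List Int), Dom_rank_from_tuple sets tuple_value → Pre_rank_from_tuple sets tuple_value → Spec_rank_from_tuple sets tuple_value (rank_from_tuple sets tuple_value)

-- ===== LEMMAS AND PROOFS =====

-- Horner recursion with an arbitrary seed splits into seed * (product of radices) + the zero-seeded run.
theorem pv_rankGo_seed (l : List (List Int × Int)) (a : Int) :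
    rankGo l a = a * (l.map (fun p => ((p.1.length : Int)))).prod + rankGo l 0 := by
  induction l generalizing a with
  | nil => simp [rankGo]
  | cons p t ih =>
    obtain ⟨s, v⟩ := p
    simp only [rankGo, List.map_cons, List.prod_cons]
    rw [ih (a * (s.length : Int) + _), ih (0 * (s.length : Int) + _)]
    ring

-- A's foldr with (rank, product) state over the index range equals (B's zipped Horner run, product of sizes).
theorem pv_foldr_eq_rankGo (sets : List (List Int)) (tv : List Int)
    (h : sets.length = tv.length) :
    (List.range sets.length).foldr
      (fun (i : Nat) (st : Int × Int) =>
        (st.1 + ((PySem.List.index? (sets.getD i []) (tv.getD i 0)).getD 0 : Int) * st.2,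
         st.2 * ((sets.getD i []).length : Int)))
      (0, 1)
      = (rankGo (sets.zip tv) 0,
         ((sets.zip tv).map (fun p => ((p.1.length : Int)))).prod) := by
  induction sets generalizing tv with
  | nil => simp [rankGo]
  | cons s ss ih =>
    cases tv with
    | nil => simp at h
    | cons v vs =>
      simp only [List.length_cons, List.range_succ_eq_map, List.foldr_cons, List.foldr_map,
        List.getD_cons_succ, List.getD_cons_zero, List.zip_cons_cons, List.map_cons,
        List.prod_cons]
      rw [ih vs (by simpa using h)]
      refine Prod.ext ?_ ?_
      · simp only [rankGo]
        conv_rhs => rw [pv_rankGo_seed]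
        ring
      · simp [mul_comm]

-- ===== VERDICT (by name: the statement is the Claim_ definition above) =====
theorem rank_from_tuple_spec : Claim_equal_rank_from_tuple := by
  intro sets tuple_value _ hpre
  unfold Spec_rank_from_tuple rank_from_tuple rank_from_tuple_alt
  rw [List.foldl_reverse, pv_foldr_eq_rankGo sets tuple_value hpre.1]
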